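-- pv_equiv track=rewrite | github.com/matuspintek-boop/ib111 | sol/05.r3_setdiff.py | set_symmetric_diff
-- ===== SOURCE A (Python) =====
-- def set_symmetric_diff(a: set[int], b: set[int]) -> set[int]:
--     result = set()
--     for x in a:
--         if x not in b:
--             result.add(x)
--     for x in b:
--         if x not in a:
--             result.add(x)
--     return result
-- ===== SOURCE B (Python) =====
-- def set_symmetric_diff(a: set[int], b: set[int]) -> set[int]:
--     counts = {}
--     for x in a:
--         counts[x] = counts.get(x, 0) + 1
--     for x in b:
--         counts[x] = counts.get(x, 0) + 1
--     return {x for x, c in counts.items() if c == 1}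
-- ===== Notes on version B (the rewrite author's own statement) =====
-- stated objective: alternative
-- what changed: Replaces the two membership-cross-check loops with a frequency table: two dict-populating passes that never test membership in the other set, followed by a single count==1 filter over the table.
import Mathlib
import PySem

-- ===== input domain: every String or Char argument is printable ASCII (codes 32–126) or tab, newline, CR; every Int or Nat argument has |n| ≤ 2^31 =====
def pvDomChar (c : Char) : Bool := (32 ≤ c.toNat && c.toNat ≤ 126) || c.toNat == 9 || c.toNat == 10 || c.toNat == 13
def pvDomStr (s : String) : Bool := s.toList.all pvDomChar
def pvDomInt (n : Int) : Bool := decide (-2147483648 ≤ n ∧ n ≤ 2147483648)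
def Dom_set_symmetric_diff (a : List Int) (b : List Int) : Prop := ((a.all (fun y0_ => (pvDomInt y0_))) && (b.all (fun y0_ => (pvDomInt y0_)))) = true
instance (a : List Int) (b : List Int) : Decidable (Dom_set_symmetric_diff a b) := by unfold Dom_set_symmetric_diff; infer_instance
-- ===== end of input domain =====

-- B replaces A's two membership-cross-check loops with a count table built in two passes and a single count==1 filter (alternative decomposition, similar cost).


-- ===== PORT A =====
def set_symmetric_diff (a : List Int) (b : List Int) : List Int :=
  let result : PySem.Set Int := PySem.Set.empty
  let result := a.foldl (fun r x => if x ∈ b then r else PySem.Set.add r x) result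
  let result := b.foldl (fun r x => if x ∈ a then r else PySem.Set.add r x) result
  result

-- ===== PORT B =====
def set_symmetric_diff_alt (a : List Int) (b : List Int) : List Int :=
  let counts : PySem.Dict Int Int := PySem.Dict.empty
  let counts := a.foldl (fun d x => d.insert x (d.getD x 0 + 1)) counts
  let counts := b.foldl (fun d x => d.insert x (d.getD x 0 + 1)) counts
  PySem.Set.ofList ((counts.items.filter (fun p => p.2 == 1)).map Prod.fst)

-- ===== PRECONDITION & SPEC =====
-- Pre_ requires each argument list to hold distinct elements: the Python parameters are sets, and a
-- duplicate-carrying list is not a valid encoding of a set (A and B read such lists differently).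
def Pre_set_symmetric_diff (a : List Int) (b : List Int) : Prop := a.Nodup ∧ b.Nodup
instance (a : List Int) (b : List Int) : Decidable (Pre_set_symmetric_diff a b) := by unfold Pre_set_symmetric_diff; infer_instance
def pvWitness_set_symmetric_diff : List Int × List Int := ([1, 2], [2, 3])

def Spec_set_symmetric_diff (a : List Int) (b : List Int) (out : List Int) : Prop := out = set_symmetric_diff_alt a b
instance (a : List Int) (b : List Int) (out : List Int) : Decidable (Spec_set_symmetric_diff a b out) := by unfold Spec_set_symmetric_diff; infer_instance

-- ===== CLAIM (what is proved, stated in full; the proofs are below) =====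
def Claim_equal_set_symmetric_diff : Prop := ∀ (a : List Int) (b : List Int), Dom_set_symmetric_diff a b → Pre_set_symmetric_diff a b → Spec_set_symmetric_diff a b (set_symmetric_diff a b)

-- ===== LEMMAS AND PROOFS =====

-- A's loop shape: adding the elements of xs failing p to a set that contains none of them appends xs.filter (!p).
theorem foldl_add_if_filter (p : Int → Prop) [DecidablePred p] (xs s : List Int) (hnd : xs.Nodup)
    (h : ∀ x ∈ xs, ¬ p x → x ∉ s) :
    xs.foldl (fun r x => if p x then r else PySem.Set.add r x) s
      = s ++ xs.filter (fun x => !decide (p x)) := by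
  induction xs generalizing s with
  | nil => simp
  | cons x xs ih =>
    rcases List.nodup_cons.mp hnd with ⟨hx, hnd'⟩
    by_cases hp : p x
    · simpa [hp] using ih s hnd' (fun y hy hpy => h y (List.mem_cons_of_mem _ hy) hpy)
    · have hxs : x ∉ s := h x List.mem_cons_self hp
      rw [List.foldl_cons]
      simp only [hp, if_false, PySem.Set.add_of_not_mem hxs]
      rw [ih (s ++ [x]) hnd' ?_]
      · simp [hp]
      · intro y hy hpy
        simp only [List.mem_append, List.mem_singleton, not_or]
        exact ⟨h y (List.mem_cons_of_mem _ hy) hpy, fun hyx => hx (hyx ▸ hy)⟩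

-- Folding Set.add over a duplicate-free list appends its fresh elements.
theorem foldl_setadd_filter (ys : List Int) (hnd : ys.Nodup) : ∀ s : List Int,
    ys.foldl PySem.Set.add s = s ++ ys.filter (fun x => !decide (x ∈ s)) := by
  induction ys with
  | nil => simp
  | cons y ys ih =>
    intro s
    rcases List.nodup_cons.mp hnd with ⟨hy, hnd'⟩
    by_cases hys : y ∈ s
    · simp only [List.foldl_cons, PySem.Set.add_of_mem hys, ih hnd' s, List.filter_cons,
        hys, decide_true, Bool.not_true, Bool.false_eq_true, if_false]
    · simp only [List.foldl_cons, PySem.Set.add_of_not_mem hys, ih hnd' (s ++ [y]),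
        List.filter_cons, hys, decide_false, Bool.not_false, List.append_assoc,
        List.singleton_append]
      congr 2
      apply List.filter_congr
      intro z hz
      have hzy : z ≠ y := fun hzy => hy (hzy ▸ hz)
      simp [hzy]

theorem ofList_of_nodup (xs : List Int) (h : xs.Nodup) : PySem.Set.ofList xs = xs := by
  simpa [PySem.Set.ofList_eq_foldl] using foldl_setadd_filter xs h []

-- ===== VERDICT (by name: the statement is the Claim_ definition above) =====
theorem set_symmetric_diff_spec : Claim_equal_set_symmetric_diff := by
  intro a b _ hpre
  rcases hpre with ⟨ha, hb⟩
  unfold Spec_set_symmetric_diff set_symmetric_diff set_symmetric_diff_alt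
  dsimp only
  -- A's side becomes a.filter(∉b) ++ b.filter(∉a)
  rw [foldl_add_if_filter (fun x => x ∈ b) a PySem.Set.empty ha
        (by intro x _ _; simp [PySem.Set.empty]),
      foldl_add_if_filter (fun x => x ∈ a) b _ hb ?side]
  case side =>
    intro x hx hpx
    simp only [PySem.Set.empty, List.nil_append, List.mem_filter]
    exact fun h => hpx h.1
  -- B's side: the two insert loops build Counter(a ++ b)
  rw [← List.foldl_append, PySem.Dict.foldl_insert_getD_add_one_eq_counter,
      PySem.Dict.items_counter, List.filter_map, List.map_map]
  have hmapfst : ∀ (g : Int → Int) (l : List Int),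
      l.map ((Prod.fst : Int × Int → Int) ∘ fun k => (k, g k)) = l := by
    intro g l
    induction l with
    | nil => rfl
    | cons x xs ih => simp only [List.map_cons, Function.comp_apply, ih]
  rw [hmapfst]
  -- the filtered key list is duplicate-free, so ofList is the identity on it
  rw [ofList_of_nodup _ (List.Nodup.filter _ (PySem.Set.nodup_ofList (a ++ b)))]
  -- the distinct keys of a ++ b, under Nodup of each part
  have hkeys : PySem.Set.ofList (a ++ b) = a ++ b.filter (fun x => !decide (x ∈ a)) := by
    rw [PySem.Set.ofList_eq_foldl, List.foldl_append, ← PySem.Set.ofList_eq_foldl,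
        ofList_of_nodup a ha, foldl_setadd_filter b hb a]
  rw [hkeys, List.filter_append]
  congr 1
  · apply List.filter_congr
    intro x hx
    have hca : a.count x = 1 := List.count_eq_one_of_mem ha hx
    by_cases hxb : x ∈ b
    · have hcb : b.count x = 1 := List.count_eq_one_of_mem hb hxb
      simp [List.count_append, hca, hcb, hxb]
    · have hcb : b.count x = 0 := List.count_eq_zero_of_not_mem hxb
      simp [List.count_append, hca, hcb, hxb]
  · rw [List.filter_filter]
    apply List.filter_congr
    intro x hxb
    by_cases hxa : x ∈ a
    · simp [hxa]
    · have hca : a.count x = 0 := List.count_eq_zero_of_not_mem hxa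
      have hcb : b.count x = 1 := List.count_eq_one_of_mem hb hxb
      simp [List.count_append, hca, hcb, hxa]
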